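-- pv_equiv track=rewrite | github.com/agapow/memeparse | memeparse/__init__.py | find
-- ===== SOURCE A (Python) =====
-- def find (needle, haystack):
-- 	"""
-- 	Return the index of the needle in the haystack
--
-- 	Parameters:
-- 		needle: any iterable
-- 		haystack: any other iterable
--
-- 	Returns:
-- 		the index of the start of needle or -1 if it is not found.
--
-- 	Looking for a sub-list of a list is actually a tricky thing. This
-- 	approach uses the Boyer-Moore-Horspool algorithm. Needle and haystack
-- 	should be any iterable, as long as their elements are hashable.
--
-- 	Example:
--
-- 		>>> find ([1, 2], [1, 1, 2])
-- 		1
-- 		>>> find ((1, 2, 3), range (10))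
-- 		1
-- 		>>> find ('gh', 'abcdefghi')
-- 		6
-- 		>>> find ([2, 3], [7, 8, 9])
-- 		-1
--
-- 	"""
-- 	h = len (haystack)
-- 	n = len (needle)
-- 	skip = {needle[i]: n - i - 1 for i in range(n - 1)}
-- 	i = n - 1
-- 	while i < h:
-- 		for j in range(n):
-- 			if haystack[i - j] != needle[-j - 1]:
-- 				i += skip.get(haystack[i], n)
-- 				break
-- 		else:
-- 			return i - n + 1
-- 	return -1
-- ===== SOURCE B (Python) =====
-- def find (needle, haystack):
-- 	"""
-- 	Return the index of the start of needle in haystack, or -1 if absent.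
--
-- 	Naive sliding-window search: try every window start left to right and
-- 	return the first that matches completely.
-- 	"""
-- 	h = len(haystack)
-- 	n = len(needle)
-- 	for i in range(h - n + 1):
-- 		if all(needle[j] == haystack[i + j] for j in range(n)):
-- 			return i
-- 	return -1
-- ===== Notes on version B (the rewrite author's own statement) =====
-- stated objective: simpler
-- what changed: Replaced the Boyer-Moore-Horspool search (skip table built from the needle, backward window comparison, data-dependent jumps) by a plain left-to-right sliding-window scan that tries every start index and returns the first full match; no hash table, no skip arithmetic.
import Mathlib
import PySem

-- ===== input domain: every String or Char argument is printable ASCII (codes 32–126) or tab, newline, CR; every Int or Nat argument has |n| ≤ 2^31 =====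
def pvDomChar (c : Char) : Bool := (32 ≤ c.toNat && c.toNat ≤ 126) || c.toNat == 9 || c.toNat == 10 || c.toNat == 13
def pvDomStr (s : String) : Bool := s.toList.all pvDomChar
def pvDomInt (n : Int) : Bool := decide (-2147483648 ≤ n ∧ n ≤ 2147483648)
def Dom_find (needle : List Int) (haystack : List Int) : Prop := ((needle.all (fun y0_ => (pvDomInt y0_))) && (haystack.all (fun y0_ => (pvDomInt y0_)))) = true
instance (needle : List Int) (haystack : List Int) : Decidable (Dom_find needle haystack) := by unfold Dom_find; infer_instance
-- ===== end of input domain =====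

-- B replaces Boyer-Moore-Horspool by a plain sliding-window scan (simpler; same worst-case cost).


-- ===== PORT A =====
-- skip = {needle[i]: n - i - 1 for i in range(n-1)}; needle[i] ported as getD (index i < n-1 is always in range, so exact)
def bmhSkip (needle : List Int) : PySem.Dict Int Int :=
  (List.range (needle.length - 1)).foldl
    (fun d k => d.insert (needle.getD k 0) ((needle.length : Int) - (k : Int) - 1)) PySem.Dict.empty

-- the inner 'for j in range(n) … break / else return': the shift does not depend on j, so the
-- loop's effect is exactly 'did every comparison succeed'; indices via pyGetD (Python semantics,
-- both haystack[i-j] and needle[-j-1] are in range whenever the loop body runs)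
def bmhInner (needle haystack : List Int) (i : Int) : Bool :=
  (List.range needle.length).all
    (fun j => PySem.List.pyGetD haystack (i - (j : Int)) 0 == PySem.List.pyGetD needle (-(j : Int) - 1) 0)

-- the 'while i < h' loop; fuel h+2 is never exhausted since every step advances i by ≥ 1
def bmhLoop (needle haystack : List Int) (skip : PySem.Dict Int Int) : Int → Nat → Int
  | _, 0 => -1
  | i, fuel+1 =>
    if i < (haystack.length : Int) then
      if bmhInner needle haystack i then i - (needle.length : Int) + 1
      else bmhLoop needle haystack skip
            (i + skip.getD (PySem.List.pyGetD haystack i 0) (needle.length : Int)) fuel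
    else -1

def find (needle : List Int) (haystack : List Int) : Int :=
  bmhLoop needle haystack (bmhSkip needle) ((needle.length : Int) - 1) (haystack.length + 2)

-- ===== PORT B =====
-- all(needle[j] == haystack[i+j] for j in range(n)); indices always in range inside the scanned windows
def matchAt (needle haystack : List Int) (i : Nat) : Bool :=
  (List.range needle.length).all (fun j => needle.getD j 0 == haystack.getD (i + j) 0)

-- 'for i in range(h - n + 1)' as recursion on the number of remaining window starts
def naiveLoop (needle haystack : List Int) : Nat → Nat → Int
  | _, 0 => -1
  | i, rem+1 => if matchAt needle haystack i then (i : Int) else naiveLoop needle haystack (i+1) rem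

def find_alt (needle : List Int) (haystack : List Int) : Int :=
  naiveLoop needle haystack 0 (haystack.length + 1 - needle.length)

-- ===== PRECONDITION & SPEC =====
def Spec_find (needle : List Int) (haystack : List Int) (out : Int) : Prop := out = find_alt needle haystack
instance (needle : List Int) (haystack : List Int) (out : Int) : Decidable (Spec_find needle haystack out) := by unfold Spec_find; infer_instance

-- ===== CLAIM (what is proved, stated in full; the proofs are below) =====
def Claim_equal_find : Prop := ∀ (needle : List Int) (haystack : List Int), Dom_find needle haystack → Spec_find needle haystack (find needle haystack)


-- ===== LEMMAS AND PROOFS =====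

-- proof-only helper: the skip dict built from the first m needle positions
def skipUpTo (needle : List Int) (m : Nat) : PySem.Dict Int Int :=
  (List.range m).foldl
    (fun d k => d.insert (needle.getD k 0) ((needle.length : Int) - (k : Int) - 1)) PySem.Dict.empty

lemma bmhSkip_eq (needle : List Int) : bmhSkip needle = skipUpTo needle (needle.length - 1) := rfl

lemma skipUpTo_succ (needle : List Int) (m : Nat) :
    skipUpTo needle (m+1)
      = (skipUpTo needle m).insert (needle.getD m 0) ((needle.length : Int) - (m : Int) - 1) := by
  unfold skipUpTo
  rw [List.range_succ, List.foldl_append]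
  rfl

lemma skip_get_spec (needle : List Int) (m : Nat) (x : Int) :
    ((skipUpTo needle m).get? x = none ∧ ∀ k, k < m → needle.getD k 0 ≠ x)
  ∨ (∃ k, k < m ∧ needle.getD k 0 = x
       ∧ (skipUpTo needle m).get? x = some ((needle.length : Int) - (k : Int) - 1)
       ∧ ∀ k', k < k' → k' < m → needle.getD k' 0 ≠ x) := by
  induction m with
  | zero =>
    left
    refine ⟨?_, fun k hk => absurd hk (by omega)⟩
    simp [skipUpTo, PySem.Dict.get?_empty]
  | succ m ih =>
    rw [skipUpTo_succ, PySem.Dict.get?_insert]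
    by_cases hx : x = needle.getD m 0
    · right
      exact ⟨m, by omega, hx.symm, by simp [hx], fun k' h1 h2 => absurd h1 (by omega)⟩
    · rw [if_neg hx]
      rcases ih with ⟨hnone, hall⟩ | ⟨k, hk, hkx, hg, hmax⟩
      · left
        refine ⟨hnone, fun k hk => ?_⟩
        rcases Nat.lt_succ_iff_lt_or_eq.mp hk with h | h
        · exact hall k h
        · subst h; exact fun he => hx he.symm
      · right
        refine ⟨k, by omega, hkx, hg, fun k' h1 h2 => ?_⟩
        rcases Nat.lt_succ_iff_lt_or_eq.mp h2 with h | h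
        · exact hmax k' h1 h
        · subst h; exact fun he => hx he.symm

lemma shift_bounds (needle : List Int) (hn : 1 ≤ needle.length) (x : Int) :
    1 ≤ (bmhSkip needle).getD x (needle.length : Int)
    ∧ (bmhSkip needle).getD x (needle.length : Int) ≤ (needle.length : Int) := by
  rw [bmhSkip_eq]
  rcases skip_get_spec needle (needle.length - 1) x with ⟨hnone, _⟩ | ⟨k, hk, _, hsome, _⟩
  · rw [PySem.Dict.getD_eq_get?_getD, hnone]
    simp
    omega
  · rw [PySem.Dict.getD_eq_get?_getD, hsome]
    simp
    omega

lemma shift_le (needle : List Int) (x : Int) (k0 : Nat)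
    (hk0 : k0 + 1 < needle.length) (hx : needle.getD k0 0 = x) :
    (bmhSkip needle).getD x (needle.length : Int) ≤ (needle.length : Int) - (k0 : Int) - 1 := by
  rw [bmhSkip_eq]
  rcases skip_get_spec needle (needle.length - 1) x with ⟨_, hall⟩ | ⟨k, hk, _, hsome, hmax⟩
  · exact absurd hx (hall k0 (by omega))
  · have hk0k : k0 ≤ k := by
      by_contra hlt
      exact hmax k0 (by omega) (by omega) hx
    rw [PySem.Dict.getD_eq_get?_getD, hsome]
    simp
    omega

lemma inner_elt (needle haystack : List Int) (i : Int) (hn : 1 ≤ needle.length)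
    (hi : (needle.length : Int) - 1 ≤ i) (hih : i < (haystack.length : Int))
    (j : Nat) (hj : j < needle.length) :
    (PySem.List.pyGetD haystack (i - (j : Int)) 0 = PySem.List.pyGetD needle (-(j : Int) - 1) 0)
      ↔ (needle.getD (needle.length - 1 - j) 0
          = haystack.getD ((i + 1 - (needle.length : Int)).toNat + (needle.length - 1 - j)) 0) := by
  have h1 : (0:Int) ≤ i - (j : Int) := by omega
  have h2 : i - (j : Int) < (haystack.length : Int) := by omega
  rw [PySem.List.pyGetD_eq_getElem _ _ h1 h2]
  have h3 : -(j : Int) - 1 = -(((j + 1 : Nat)) : Int) := by push_cast; ring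
  rw [h3, PySem.List.pyGetD_neg_natCast _ _ _ (by omega) (by omega)]
  have hsj : (i + 1 - (needle.length : Int)).toNat + (needle.length - 1 - j) = (i - (j : Int)).toNat := by
    omega
  have h4 : needle.length - (j + 1) = needle.length - 1 - j := by omega
  rw [List.getD_eq_getElem?_getD, List.getD_eq_getElem?_getD, hsj, ← h4]
  rw [List.getElem?_eq_getElem (by omega : needle.length - (j + 1) < needle.length),
      List.getElem?_eq_getElem (by omega : (i - (j : Int)).toNat < haystack.length)]
  simp only [Option.getD_some]
  exact eq_comm

lemma inner_iff (needle haystack : List Int) (i : Int) (hn : 1 ≤ needle.length)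
    (hi : (needle.length : Int) - 1 ≤ i) (hih : i < (haystack.length : Int)) :
    (bmhInner needle haystack i = true)
      ↔ (matchAt needle haystack (i + 1 - (needle.length : Int)).toNat = true) := by
  unfold bmhInner matchAt
  simp only [List.all_eq_true, List.mem_range, beq_iff_eq]
  constructor
  · intro H j hj
    have hj' : needle.length - 1 - j < needle.length := by omega
    have hh := (inner_elt needle haystack i hn hi hih (needle.length - 1 - j) hj').mp (H _ hj')
    have e : needle.length - 1 - (needle.length - 1 - j) = j := by omega
    rw [e] at hh
    exact hh
  · intro H j hj
    exact (inner_elt needle haystack i hn hi hih j hj).mpr (H _ (by omega))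

lemma no_match_mid (needle haystack : List Int) (i : Int) (hn : 1 ≤ needle.length)
    (hi : (needle.length : Int) - 1 ≤ i) (hih : i < (haystack.length : Int)) (d : Nat) (hd1 : 1 ≤ d)
    (hds : (d : Int) < (bmhSkip needle).getD (PySem.List.pyGetD haystack i 0) (needle.length : Int)) :
    matchAt needle haystack ((i + 1 - (needle.length : Int)).toNat + d) = false := by
  by_contra hmc
  rw [Bool.not_eq_false] at hmc
  unfold matchAt at hmc
  simp only [List.all_eq_true, List.mem_range, beq_iff_eq] at hmc
  have hshift_le := (shift_bounds needle hn (PySem.List.pyGetD haystack i 0)).2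
  have hdn : d < needle.length := by omega
  have hkey := hmc (needle.length - 1 - d) (by omega)
  have hidx : (i + 1 - (needle.length : Int)).toNat + d + (needle.length - 1 - d) = i.toNat := by omega
  rw [hidx] at hkey
  have hx : haystack.getD i.toNat 0 = PySem.List.pyGetD haystack i 0 := by
    rw [PySem.List.pyGetD_eq_getElem _ _ (by omega) hih, List.getD_eq_getElem?_getD,
        List.getElem?_eq_getElem (by omega : i.toNat < haystack.length)]
    simp
  rw [hx] at hkey
  have hle := shift_le needle (PySem.List.pyGetD haystack i 0) (needle.length - 1 - d) (by omega) hkey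
  omega

lemma naive_shift (needle haystack : List Int) (stop : Nat) (δ : Nat) :
    ∀ s : Nat, (∀ d, d < δ → matchAt needle haystack (s + d) = false) →
    naiveLoop needle haystack s (stop - s) = naiveLoop needle haystack (s + δ) (stop - (s + δ)) := by
  induction δ with
  | zero => intro s _; rfl
  | succ δ ih =>
    intro s hno
    by_cases hs : s < stop
    · have h1 : stop - s = (stop - (s+1)) + 1 := by omega
      rw [h1]
      rw [show naiveLoop needle haystack s ((stop - (s+1)) + 1)
            = naiveLoop needle haystack (s+1) (stop - (s+1)) from by
          have h0 : matchAt needle haystack s = false := by simpa using hno 0 (by omega)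
          simp [naiveLoop, h0]]
      rw [ih (s+1) (fun d hd => by
        have hh := hno (d+1) (by omega)
        rw [show s + 1 + d = s + (d + 1) from by omega]
        exact hh)]
      rw [show s + 1 + δ = s + (δ + 1) from by omega]
    · have h1 : stop - s = 0 := by omega
      have h2 : stop - (s + (δ + 1)) = 0 := by omega
      rw [h1, h2]
      rfl

lemma bmh_eq_naive (needle haystack : List Int) (hn : 1 ≤ needle.length) :
    ∀ fuel : Nat, ∀ i : Int, (needle.length : Int) - 1 ≤ i →
      (haystack.length : Int) + 1 - i ≤ (fuel : Int) →
      bmhLoop needle haystack (bmhSkip needle) i fuel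
        = naiveLoop needle haystack (i + 1 - (needle.length : Int)).toNat
            ((haystack.length + 1 - needle.length) - (i + 1 - (needle.length : Int)).toNat) := by
  intro fuel
  induction fuel with
  | zero =>
    intro i hi hfuel
    have h0 : (haystack.length + 1 - needle.length) - (i + 1 - (needle.length : Int)).toNat = 0 := by
      omega
    rw [h0]
    rfl
  | succ fuel ih =>
    intro i hi hfuel
    by_cases hih : i < (haystack.length : Int)
    · by_cases hinner : bmhInner needle haystack i = true
      · have hmatch := (inner_iff needle haystack i hn hi hih).mp hinner
        have hrem : (haystack.length + 1 - needle.length) - (i + 1 - (needle.length : Int)).toNat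
            = ((haystack.length + 1 - needle.length) - (i + 1 - (needle.length : Int)).toNat - 1) + 1 := by
          omega
        rw [show bmhLoop needle haystack (bmhSkip needle) i (fuel+1)
              = i - (needle.length : Int) + 1 from by simp [bmhLoop, hih, hinner]]
        rw [hrem]
        rw [show naiveLoop needle haystack (i + 1 - (needle.length : Int)).toNat
              (((haystack.length + 1 - needle.length) - (i + 1 - (needle.length : Int)).toNat - 1) + 1)
              = ((i + 1 - (needle.length : Int)).toNat : Int) from by
            simp only [naiveLoop, hmatch, if_true]]
        omega
      · have hif : bmhInner needle haystack i = false := by simpa using hinner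
        have hmf : matchAt needle haystack (i + 1 - (needle.length : Int)).toNat = false := by
          have hni := (inner_iff needle haystack i hn hi hih).not.mp (by simp [hif])
          simpa using hni
        have hb := shift_bounds needle hn (PySem.List.pyGetD haystack i 0)
        rw [show bmhLoop needle haystack (bmhSkip needle) i (fuel+1)
              = bmhLoop needle haystack (bmhSkip needle)
                  (i + (bmhSkip needle).getD (PySem.List.pyGetD haystack i 0) (needle.length : Int)) fuel
            from by simp [bmhLoop, hih, hif]]
        rw [ih _ (by omega) (by omega)]
        have hδ : (i + (bmhSkip needle).getD (PySem.List.pyGetD haystack i 0) (needle.length : Int)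
                    + 1 - (needle.length : Int)).toNat
            = (i + 1 - (needle.length : Int)).toNat
              + ((bmhSkip needle).getD (PySem.List.pyGetD haystack i 0) (needle.length : Int)).toNat := by
          omega
        rw [hδ]
        symm
        apply naive_shift
        intro d hd
        rcases Nat.eq_zero_or_pos d with h0 | h1
        · subst h0; simpa using hmf
        · exact no_match_mid needle haystack i hn hi hih d h1 (by omega)
    · have h0 : (haystack.length + 1 - needle.length) - (i + 1 - (needle.length : Int)).toNat = 0 := by
        omega
      rw [h0]
      simp [bmhLoop, hih, naiveLoop]

-- ===== VERDICT (by name: the statement is the Claim_ definition above) =====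
theorem find_spec : Claim_equal_find := by
  unfold Claim_equal_find Spec_find
  intro needle haystack _
  rcases hne : needle with _ | ⟨a, nd⟩
  · have h1 : (-1 : Int) < (haystack.length : Int) := by omega
    simp [find, find_alt, bmhLoop, bmhInner, naiveLoop, matchAt, h1]
  · have hn : 1 ≤ (a :: nd).length := by simp
    have hmain := bmh_eq_naive (a :: nd) haystack hn (haystack.length + 2)
      (((a :: nd).length : Int) - 1) (by omega) (by push_cast; omega)
    unfold find find_alt
    rw [hmain]
    have e1 : ((((a :: nd).length : Int) - 1) + 1 - (((a :: nd).length : Int))).toNat = 0 := by omega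
    rw [e1]
    simp
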